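-- pv_equiv track=rewrite | github.com/Andy-LZH/PartInventory | src/Classcification/backend/data/analytics/check_multiple_first_appearance.py | check_annotation_agreement
-- ===== SOURCE A (Python) =====
-- def check_annotation_agreement(submissions):
--     """
--     Check agreement for annotations (simplified version from validate_and_merge.py).
--     Returns consensus results where agreement exists.
--     """
--     if not submissions:
--         return []
--
--     # Extract per-annotation results
--     rows = []
--     for s in submissions:
--         anns = s.get("annotations", [])
--         rows.append([a.get("result") for a in anns])
--
--     # Pad to same length
--     max_len = max(len(r) for r in rows) if rows else 0
--     for r in rows:
--         if len(r) < max_len: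
--             r.extend([None] * (max_len - len(r)))
--
--     consensus_results = []
--
--     for ann_idx in range(max_len):
--         # Get all results for this annotation position
--         ann_results = [row[ann_idx] for row in rows if row[ann_idx] is not None]
--
--         if len(ann_results) < 2:
--             # For single submissions in main/spin_train_parts, accept as-is
--             if len(ann_results) == 1:
--                 consensus_results.append(ann_results[0])
--             continue
--
--         # Count occurrences
--         from collections import Counter
--         result_counts = Counter(ann_results)
--         most_common = result_counts.most_common()
--
--         # Check for agreement (unanimous or 2+ majority)
--         if len(most_common) == 1 or most_common[0][1] >= 2:
--             consensus_results.append(most_common[0][0])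
--
--     return consensus_results
-- ===== SOURCE B (Python) =====
-- from collections import Counter
--
--
-- def check_annotation_agreement(submissions):
--     """One row-major pass builds a per-position Counter of the non-None results
--     (in submission order), then one pass over positions emits the consensus;
--     no padding, no per-column rescans."""
--     per_index = {}
--     max_len = 0
--     for s in submissions:
--         anns = s.get("annotations", [])
--         if len(anns) > max_len:
--             max_len = len(anns)
--         for idx, a in enumerate(anns):
--             r = a.get("result")
--             if r is not None:
--                 per_index.setdefault(idx, Counter())[r] += 1
--     consensus = []
--     for idx in range(max_len):
--         c = per_index.get(idx)
--         if c is None: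
--             continue
--         mc = c.most_common()
--         if len(mc) == 1 or mc[0][1] >= 2:
--             consensus.append(mc[0][0])
--     return consensus
-- ===== Notes on version B (the rewrite author's own statement) =====
-- stated objective: alternative
-- what changed: Instead of extracting rows, padding them all to max length and rescanning every row per column, B makes one row-major pass that builds a per-position Counter of non-None results (and the max length) and then emits the consensus in a single pass over positions.
import Mathlib
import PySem

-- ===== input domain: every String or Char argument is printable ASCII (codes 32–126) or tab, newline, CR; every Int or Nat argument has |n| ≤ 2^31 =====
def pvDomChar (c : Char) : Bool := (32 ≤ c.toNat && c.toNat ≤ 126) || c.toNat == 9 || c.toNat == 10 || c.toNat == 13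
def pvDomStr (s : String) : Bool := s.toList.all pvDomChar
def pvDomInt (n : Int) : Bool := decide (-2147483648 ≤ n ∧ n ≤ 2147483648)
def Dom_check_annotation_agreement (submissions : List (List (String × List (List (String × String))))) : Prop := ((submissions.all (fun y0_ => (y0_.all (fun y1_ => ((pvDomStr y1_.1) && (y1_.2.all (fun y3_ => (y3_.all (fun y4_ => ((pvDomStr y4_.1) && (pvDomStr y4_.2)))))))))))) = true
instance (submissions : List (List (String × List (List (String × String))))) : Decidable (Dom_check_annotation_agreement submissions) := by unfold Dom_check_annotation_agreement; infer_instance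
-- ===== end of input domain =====

-- B replaces A's pad-then-rescan-per-column shape by one row-major pass building per-position
-- Counters plus one emitting pass over positions (objective: alternative, same asymptotic cost).

-- ===== PORT A =====
def pvRowA (s : List (String × List (List (String × String)))) : List (Option String) :=
  ((PySem.Dict.mk s).getD "annotations" []).map (fun a => (PySem.Dict.mk a).get? "result")

def pvColumn (rows2 : List (List (Option String))) (annIdx : Int) : List String :=
  rows2.filterMap (fun row => (PySem.List.pyGet? row annIdx).getD none)

def pvStepA (rows2 : List (List (Option String))) (acc : List String) (annIdx : Int) : List String :=
  let annResults := pvColumn rows2 annIdx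
  if annResults.length < 2 then
    (if annResults.length = 1 then acc ++ [annResults.headD ""] else acc)
  else
    let mostCommon := PySem.List.sorted (PySem.Dict.counter annResults).items (fun p => p.2) true
    let top := mostCommon.headD ("", 0)
    if mostCommon.length = 1 ∨ 2 ≤ top.2 then acc ++ [top.1] else acc

def pvMaxLen (rows : List (List (Option String))) : Int :=
  if rows = [] then 0
  else (PySem.List.max? (rows.map (fun r => (r.length : Int))) (fun x => x)).getD 0

def pvPad (maxLen : Int) (r : List (Option String)) : List (Option String) :=
  if (r.length : Int) < maxLen then r ++ List.replicate (maxLen - (r.length : Int)).toNat none else r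

def check_annotation_agreement (submissions : List (List (String × List (List (String × String))))) : List String :=
  if submissions = [] then []
  else
    (PySem.List.pyRange 0 (pvMaxLen (submissions.map pvRowA)) 1).foldl
      (pvStepA ((submissions.map pvRowA).map (pvPad (pvMaxLen (submissions.map pvRowA))))) []

-- ===== PORT B =====
def pvBInner (d : PySem.Dict Int (PySem.Dict String Int)) (p : Int × List (String × String)) :
    PySem.Dict Int (PySem.Dict String Int) :=
  match (PySem.Dict.mk p.2).get? "result" with
  | none => d
  | some r => d.modify p.1 PySem.Dict.empty (fun c => c.modify r 0 (· + 1))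

def pvBOuter (st : PySem.Dict Int (PySem.Dict String Int) × Int)
    (s : List (String × List (List (String × String)))) :
    PySem.Dict Int (PySem.Dict String Int) × Int :=
  let anns := (PySem.Dict.mk s).getD "annotations" []
  ((PySem.List.enumerate anns 0).foldl pvBInner st.1,
   if st.2 < (anns.length : Int) then (anns.length : Int) else st.2)

def pvBEmit (counters : PySem.Dict Int (PySem.Dict String Int)) (acc : List String) (idx : Int) : List String :=
  match counters.get? idx with
  | none => acc
  | some c =>
    let mc := PySem.List.sorted c.items (fun p => p.2) true
    let top := mc.headD ("", 0)
    if mc.length = 1 ∨ 2 ≤ top.2 then acc ++ [top.1] else acc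

def check_annotation_agreement_alt (submissions : List (List (String × List (List (String × String))))) : List String :=
  (PySem.List.pyRange 0 (submissions.foldl pvBOuter (PySem.Dict.empty, 0)).2 1).foldl
    (pvBEmit (submissions.foldl pvBOuter (PySem.Dict.empty, 0)).1) []

-- ===== PRECONDITION & SPEC =====
def Spec_check_annotation_agreement (submissions : List (List (String × List (List (String × String))))) (out : List String) : Prop := out = check_annotation_agreement_alt submissions
instance (submissions : List (List (String × List (List (String × String))))) (out : List String) : Decidable (Spec_check_annotation_agreement submissions out) := by unfold Spec_check_annotation_agreement; infer_instance

-- ===== CLAIM (what is proved, stated in full; the proofs are below) =====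
def Claim_equal_check_annotation_agreement : Prop := ∀ (submissions : List (List (String × List (List (String × String))))), Dom_check_annotation_agreement submissions → Spec_check_annotation_agreement submissions (check_annotation_agreement submissions)

-- ===== LEMMAS AND PROOFS =====

-- proof-side helpers
def pvAnns (s : List (String × List (List (String × String)))) : List (List (String × String)) :=
  (PySem.Dict.mk s).getD "annotations" []

def pvColOpt (r : List (Option String)) (idx : Int) : Option String :=
  (PySem.List.pyGet? r idx).getD none

def pvOpts (subs : List (List (String × List (List (String × String))))) (idx : Int) : List (Option String) :=
  subs.map (fun s => pvColOpt (pvRowA s) idx)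

def pvVals (subs : List (List (String × List (List (String × String))))) (idx : Int) : List String :=
  (pvOpts subs idx).filterMap id

def pvAddC (c : PySem.Dict String Int) (o : Option String) : PySem.Dict String Int :=
  match o with
  | none => c
  | some r => c.modify r 0 (· + 1)

lemma pv_inner_getD (anns : List (List (String × String))) :
    ∀ (s : Int) (d : PySem.Dict Int (PySem.Dict String Int)) (idx : Int),
    ((PySem.List.enumerate anns s).foldl pvBInner d).getD idx PySem.Dict.empty
    = pvAddC (d.getD idx PySem.Dict.empty)
        (if s ≤ idx then ((anns.map (fun a => (PySem.Dict.mk a).get? "result"))[(idx - s).toNat]?).getD none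
         else none) := by
  induction anns with
  | nil =>
    intro s d idx
    simp [PySem.List.enumerate_nil, pvAddC]
  | cons a anns ih =>
    intro s d idx
    rw [PySem.List.enumerate_cons, List.foldl_cons, ih (s + 1)]
    by_cases hidx : idx = s
    · subst hidx
      rw [if_neg (by omega : ¬(idx + 1 ≤ idx)), if_pos (le_refl idx)]
      simp only [sub_self, Int.toNat_zero, List.map_cons, List.getElem?_cons_zero]
      unfold pvBInner
      cases h : (PySem.Dict.mk a).get? "result" with
      | none => simp [pvAddC]
      | some r => simp [pvAddC, PySem.Dict.getD_modify_self]
    · have hb : (pvBInner d (s, a)).getD idx PySem.Dict.empty = d.getD idx PySem.Dict.empty := by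
        unfold pvBInner
        cases h : (PySem.Dict.mk a).get? "result" with
        | none => rfl
        | some r => exact PySem.Dict.getD_modify_of_ne _ _ _ hidx
      rw [hb]
      congr 1
      by_cases h2 : s ≤ idx
      · rw [if_pos (by omega : s + 1 ≤ idx), if_pos h2,
            (by omega : (idx - s).toNat = (idx - (s + 1)).toNat + 1)]
        simp
      · rw [if_neg (by omega : ¬(s + 1 ≤ idx)), if_neg h2]

lemma pv_inner_contains (anns : List (List (String × String))) :
    ∀ (s : Int) (d : PySem.Dict Int (PySem.Dict String Int)) (idx : Int),
    ((PySem.List.enumerate anns s).foldl pvBInner d).contains idx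
    = ((if s ≤ idx then ((anns.map (fun a => (PySem.Dict.mk a).get? "result"))[(idx - s).toNat]?).getD none
        else none).isSome || d.contains idx) := by
  induction anns with
  | nil =>
    intro s d idx
    simp [PySem.List.enumerate_nil]
  | cons a anns ih =>
    intro s d idx
    rw [PySem.List.enumerate_cons, List.foldl_cons, ih (s + 1)]
    by_cases hidx : idx = s
    · subst hidx
      rw [if_neg (by omega : ¬(idx + 1 ≤ idx)), if_pos (le_refl idx)]
      simp only [sub_self, Int.toNat_zero, List.map_cons, List.getElem?_cons_zero]
      unfold pvBInner
      cases h : (PySem.Dict.mk a).get? "result" with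
      | none => simp
      | some r => simp [PySem.Dict.contains_modify]
    · have hb : (pvBInner d (s, a)).contains idx = d.contains idx := by
        unfold pvBInner
        cases h : (PySem.Dict.mk a).get? "result" with
        | none => rfl
        | some r =>
          rw [PySem.Dict.contains_modify]
          simp [hidx]
      rw [hb]
      congr 1
      by_cases h2 : s ≤ idx
      · rw [if_pos (by omega : s + 1 ≤ idx), if_pos h2,
            (by omega : (idx - s).toNat = (idx - (s + 1)).toNat + 1)]
        simp
      · rw [if_neg (by omega : ¬(s + 1 ≤ idx)), if_neg h2]

lemma pv_colOpt_eq_getElem (s0 : List (String × List (List (String × String)))) (idx : Int) (h : 0 ≤ idx) :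
    pvColOpt (pvRowA s0) idx
    = (((pvAnns s0).map (fun a => (PySem.Dict.mk a).get? "result"))[idx.toNat]?).getD none := by
  unfold pvColOpt pvRowA pvAnns
  conv_lhs => rw [(Int.toNat_of_nonneg h).symm]
  rw [PySem.List.pyGet?_natCast]

lemma pv_outer_getD (subs : List (List (String × List (List (String × String))))) :
    ∀ (d : PySem.Dict Int (PySem.Dict String Int)) (m : Int) (idx : Int), 0 ≤ idx →
    ((subs.foldl pvBOuter (d, m)).1).getD idx PySem.Dict.empty
    = (pvOpts subs idx).foldl pvAddC (d.getD idx PySem.Dict.empty) := by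
  induction subs with
  | nil => intro d m idx _; rfl
  | cons s0 subs ih =>
    intro d m idx h
    rw [List.foldl_cons]
    show (((subs.foldl pvBOuter (pvBOuter (d, m) s0)).1)).getD idx PySem.Dict.empty = _
    have hst : pvBOuter (d, m) s0
        = ((PySem.List.enumerate (pvAnns s0) 0).foldl pvBInner d,
           if m < ((pvAnns s0).length : Int) then ((pvAnns s0).length : Int) else m) := rfl
    rw [hst, ih _ _ _ h]
    have hcol := pv_colOpt_eq_getElem s0 idx h
    have hin := pv_inner_getD (pvAnns s0) 0 d idx
    rw [if_pos h, (by omega : idx - 0 = idx)] at hin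
    rw [show pvOpts (s0 :: subs) idx = pvColOpt (pvRowA s0) idx :: pvOpts subs idx from rfl,
        List.foldl_cons, hcol, hin]

lemma pv_outer_contains (subs : List (List (String × List (List (String × String))))) :
    ∀ (d : PySem.Dict Int (PySem.Dict String Int)) (m : Int) (idx : Int), 0 ≤ idx →
    ((subs.foldl pvBOuter (d, m)).1).contains idx
    = ((pvOpts subs idx).any Option.isSome || d.contains idx) := by
  induction subs with
  | nil => intro d m idx _; simp [pvOpts]
  | cons s0 subs ih =>
    intro d m idx h
    rw [List.foldl_cons]
    show (((subs.foldl pvBOuter (pvBOuter (d, m) s0)).1)).contains idx = _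
    have hst : pvBOuter (d, m) s0
        = ((PySem.List.enumerate (pvAnns s0) 0).foldl pvBInner d,
           if m < ((pvAnns s0).length : Int) then ((pvAnns s0).length : Int) else m) := rfl
    rw [hst, ih _ _ _ h]
    have hcol := pv_colOpt_eq_getElem s0 idx h
    have hin := pv_inner_contains (pvAnns s0) 0 d idx
    rw [if_pos h, (by omega : idx - 0 = idx)] at hin
    rw [hin, show pvOpts (s0 :: subs) idx = pvColOpt (pvRowA s0) idx :: pvOpts subs idx from rfl,
        List.any_cons, hcol]
    cases (((pvAnns s0).map (fun a => (PySem.Dict.mk a).get? "result"))[idx.toNat]?).getD none <;>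
      cases d.contains idx <;> simp

lemma pv_outer_max (subs : List (List (String × List (List (String × String))))) :
    ∀ (d : PySem.Dict Int (PySem.Dict String Int)) (m : Int),
    (subs.foldl pvBOuter (d, m)).2
    = (subs.map (fun s => ((pvAnns s).length : Int))).foldl max m := by
  induction subs with
  | nil => intro d m; rfl
  | cons s0 subs ih =>
    intro d m
    rw [List.foldl_cons, List.map_cons, List.foldl_cons]
    show (subs.foldl pvBOuter (pvBOuter (d, m) s0)).2 = _
    have hst : pvBOuter (d, m) s0
        = ((PySem.List.enumerate (pvAnns s0) 0).foldl pvBInner d,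
           if m < ((pvAnns s0).length : Int) then ((pvAnns s0).length : Int) else m) := rfl
    rw [hst, ih]
    congr 1
    split_ifs <;> omega

lemma pv_foldl_pvAddC (opts : List (Option String)) :
    ∀ c : PySem.Dict String Int,
    opts.foldl pvAddC c = (opts.filterMap id).foldl (fun c r => c.modify r 0 (· + 1)) c := by
  induction opts with
  | nil => intro c; rfl
  | cons o t ih => intro c; cases o <;> simp [pvAddC, ih]

lemma pv_any_isSome (opts : List (Option String)) :
    opts.any Option.isSome = decide (opts.filterMap id ≠ []) := by
  induction opts with
  | nil => simp
  | cons o t ih => cases o <;> simp [ih]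

lemma pv_counters_getD (subs : List (List (String × List (List (String × String))))) (idx : Int) (h : 0 ≤ idx) :
    ((subs.foldl pvBOuter (PySem.Dict.empty, 0)).1).getD idx PySem.Dict.empty
    = PySem.Dict.counter (pvVals subs idx) := by
  rw [pv_outer_getD subs _ _ _ h, PySem.Dict.getD_empty, PySem.Dict.counter_eq_foldl,
      pv_foldl_pvAddC]
  rfl

lemma pv_counters_contains (subs : List (List (String × List (List (String × String))))) (idx : Int) (h : 0 ≤ idx) :
    ((subs.foldl pvBOuter (PySem.Dict.empty, 0)).1).contains idx
    = decide (pvVals subs idx ≠ []) := by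
  rw [pv_outer_contains subs _ _ _ h, PySem.Dict.contains_empty, Bool.or_false, pv_any_isSome]
  rfl

lemma pv_counters_get? (subs : List (List (String × List (List (String × String))))) (idx : Int) (h : 0 ≤ idx)
    (hne : pvVals subs idx ≠ []) :
    ((subs.foldl pvBOuter (PySem.Dict.empty, 0)).1).get? idx
    = some (PySem.Dict.counter (pvVals subs idx)) := by
  have h1 : (((subs.foldl pvBOuter (PySem.Dict.empty, 0)).1).get? idx).isSome := by
    rw [← PySem.Dict.contains_eq_isSome_get?, pv_counters_contains subs idx h]
    simpa using hne
  obtain ⟨c, hcc⟩ := Option.isSome_iff_exists.mp h1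
  have h2 : ((subs.foldl pvBOuter (PySem.Dict.empty, 0)).1).getD idx PySem.Dict.empty = c := by
    rw [PySem.Dict.getD_eq_get?_getD, hcc]; rfl
  rw [hcc]
  rw [← h2, pv_counters_getD subs idx h]

lemma pv_pad_colOpt (r : List (Option String)) (k : Nat) (idx : Int) (h : 0 ≤ idx) :
    pvColOpt (r ++ List.replicate k none) idx = pvColOpt r idx := by
  unfold pvColOpt
  rw [(Int.toNat_of_nonneg h).symm, PySem.List.pyGet?_natCast, PySem.List.pyGet?_natCast]
  by_cases hl : idx.toNat < r.length
  · rw [List.getElem?_append_left hl]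
  · have h1 : r[idx.toNat]? = none := by rw [List.getElem?_eq_none_iff]; omega
    rw [List.getElem?_append_right (by omega), h1, List.getElem?_replicate]
    split <;> rfl

lemma pv_column_eq (subs : List (List (String × List (List (String × String))))) (maxLen : Int)
    (idx : Int) (h : 0 ≤ idx) :
    pvColumn ((subs.map pvRowA).map (pvPad maxLen)) idx
    = pvVals subs idx := by
  unfold pvColumn pvVals pvOpts pvPad
  rw [List.filterMap_map, List.filterMap_map, List.filterMap_map]
  apply List.filterMap_congr
  intro s _
  show pvColOpt (if _ then pvRowA s ++ _ else pvRowA s) idx = pvColOpt (pvRowA s) idx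
  split
  · exact pv_pad_colOpt _ _ _ h
  · rfl

lemma pv_singleton_sorted (x : String) :
    PySem.List.sorted [(x, (1 : Int))] (fun p => p.2) true = [(x, 1)] :=
  List.perm_singleton.mp (PySem.List.sorted_perm _ _ _)

lemma pv_counter_singleton_items (x : String) :
    (PySem.Dict.counter [x]).items = [(x, (1 : Int))] := by
  rw [PySem.Dict.items_counter]
  simp [PySem.Set.ofList]

lemma pv_step_eq (subs : List (List (String × List (List (String × String))))) (maxLen : Int)
    (idx : Int) (h : 0 ≤ idx) (acc : List String) :
    pvStepA ((subs.map pvRowA).map (pvPad maxLen)) acc idx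
    = pvBEmit ((subs.foldl pvBOuter (PySem.Dict.empty, 0)).1) acc idx := by
  unfold pvStepA pvBEmit
  rw [pv_column_eq subs maxLen idx h]
  rcases hv : pvVals subs idx with _ | ⟨x, _ | ⟨y, rest⟩⟩
  · have hget : ((subs.foldl pvBOuter (PySem.Dict.empty, 0)).1).get? idx = none := by
      rw [PySem.Dict.get?_eq_none_iff_contains, pv_counters_contains subs idx h, hv]
      simp
    rw [hget]
    rfl
  · have hget := pv_counters_get? subs idx h (by rw [hv]; simp)
    rw [hv] at hget
    rw [hget]
    simp [pv_counter_singleton_items, pv_singleton_sorted]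
  · have hget := pv_counters_get? subs idx h (by rw [hv]; simp)
    rw [hv] at hget
    rw [hget]
    have hlen : ¬((x :: y :: rest).length < 2) := by simp
    simp only [hlen, if_false]

lemma pv_max_eq (s0 : List (String × List (List (String × String))))
    (subs : List (List (String × List (List (String × String))))) :
    pvMaxLen ((s0 :: subs).map pvRowA)
    = ((s0 :: subs).foldl pvBOuter (PySem.Dict.empty, 0)).2 := by
  unfold pvMaxLen
  rw [if_neg (by simp : ¬((s0 :: subs).map pvRowA = [])), pv_outer_max]
  have hmap : ((s0 :: subs).map pvRowA).map (fun r => ((r.length : Int)))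
      = (s0 :: subs).map (fun s => ((pvAnns s).length : Int)) := by
    rw [List.map_map]
    apply List.map_congr_left
    intro s _
    show ((pvRowA s).length : Int) = _
    unfold pvRowA pvAnns
    rw [List.length_map]
  rw [hmap, List.map_cons, PySem.List.max?_id_cons, List.foldl_cons, Option.getD_some,
      max_eq_right (Int.natCast_nonneg _)]

-- ===== VERDICT (by name: the statement is the Claim_ definition above) =====
theorem check_annotation_agreement_spec : Claim_equal_check_annotation_agreement := by
  intro subs _
  unfold Spec_check_annotation_agreement
  cases subs with
  | nil => rfl
  | cons s0 subs' =>
    unfold check_annotation_agreement check_annotation_agreement_alt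
    rw [if_neg (by simp : ¬(s0 :: subs' = []))]
    rw [pv_max_eq s0 subs']
    apply PySem.List.foldl_congr_mem
    intro acc idx hmem
    have h0 : 0 ≤ idx := (PySem.List.mem_pyRange_one.mp hmem).1
    exact pv_step_eq (s0 :: subs') _ idx h0 acc
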